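-- pv_equiv track=rewrite | github.com/LokiD-SE/BugzillaTracker | get_all_bugs.py | organize_bugs_by_product
-- ===== SOURCE A (Python) =====
-- def organize_bugs_by_product(bugs_info):
--     status_priority = {
--         'IN_PROGRESS': 1,
--         'IN_PROGRESS_DEV': 2,
--         'CONFIRMED': 3,
--         'NEEDS_INFO': 4,
--         'UNCONFIRMED': 5,
--         'REOPENED': 6,
--         'RESOLVED': 7,
--     }
--     bugs_by_product = {}
--     for bug_info in bugs_info:
--         product = bug_info[2]
--         if product not in bugs_by_product:
--             bugs_by_product[product] = []
--         bugs_by_product[product].append(bug_info)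
--     for product in bugs_by_product:
--         bugs_by_product[product].sort(
--             key=lambda x: (
--                 status_priority.get(x[1], 999),
--                 x[0]
--             )
--         )
--     return bugs_by_product
-- ===== SOURCE B (Python) =====
-- def organize_bugs_by_product(bugs_info):
--     status_priority = {
--         'IN_PROGRESS': 1,
--         'IN_PROGRESS_DEV': 2,
--         'CONFIRMED': 3,
--         'NEEDS_INFO': 4,
--         'UNCONFIRMED': 5,
--         'REOPENED': 6,
--         'RESOLVED': 7,
--     }
--     bugs_by_product = {}
--     for bug_info in bugs_info:
--         bugs_by_product.setdefault(bug_info[2], [])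
--     for bug_info in sorted(
--         bugs_info,
--         key=lambda x: (status_priority.get(x[1], 999), x[0]),
--     ):
--         bugs_by_product[bug_info[2]].append(bug_info)
--     return bugs_by_product
-- ===== Notes on version B (the rewrite author's own statement) =====
-- stated objective: alternative
-- what changed: Instead of grouping bugs into per-product buckets and then sorting each bucket separately, B seeds the buckets in first-appearance order, performs ONE global stable sort of the whole list by (status priority, id), and distributes the sorted bugs into their buckets in a single pass; stability of Python's sort makes each bucket come out identically sorted.
import Mathlib
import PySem

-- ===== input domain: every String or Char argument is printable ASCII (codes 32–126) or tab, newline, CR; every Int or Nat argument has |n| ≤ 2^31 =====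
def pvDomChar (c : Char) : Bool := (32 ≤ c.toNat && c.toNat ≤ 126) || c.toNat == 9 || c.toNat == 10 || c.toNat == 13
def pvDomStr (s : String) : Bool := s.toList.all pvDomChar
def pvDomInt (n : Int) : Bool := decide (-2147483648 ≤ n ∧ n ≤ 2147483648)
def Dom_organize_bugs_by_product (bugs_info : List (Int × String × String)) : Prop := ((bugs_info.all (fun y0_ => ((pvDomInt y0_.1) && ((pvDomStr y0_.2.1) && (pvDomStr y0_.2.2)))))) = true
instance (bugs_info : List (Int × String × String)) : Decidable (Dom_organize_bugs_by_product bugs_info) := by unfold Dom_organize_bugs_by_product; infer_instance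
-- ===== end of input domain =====

-- B replaces A's group-then-sort-each-bucket with seed-buckets + ONE global stable sort + one
-- grouping pass (same result by stability of Python's sort); objective: alternative decomposition.

-- shared constant table: the status_priority dict literal both Pythons contain
def pvStatusPriority : PySem.Dict String Int :=
  ⟨[("IN_PROGRESS", 1), ("IN_PROGRESS_DEV", 2), ("CONFIRMED", 3), ("NEEDS_INFO", 4),
    ("UNCONFIRMED", 5), ("REOPENED", 6), ("RESOLVED", 7)]⟩

-- ===== PORT A =====
-- for each bug: seed an empty bucket on first sight, append; then sort every bucket by (priority, id)
def organize_bugs_by_product (bugs_info : List (Int × String × String)) : List (String × List (Int × String × String)) :=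
  let sp := pvStatusPriority
  let bugs_by_product : PySem.Dict String (List (Int × String × String)) :=
    bugs_info.foldl (fun d b =>
      let d := if d.contains b.2.2 then d else d.insert b.2.2 []
      d.modify b.2.2 [] (fun l => l ++ [b])) ⟨[]⟩
  -- 'for product in bugs_by_product: bugs_by_product[product].sort(key=…)'
  bugs_by_product.items.map (fun p =>
    (p.1, PySem.List.sorted2 p.2 (fun x => sp.getD x.2.1 999) (fun x => x.1)))

-- ===== PORT B =====
-- seed all buckets (first-appearance order), then one global stable sort, then append in order
def organize_bugs_by_product_alt (bugs_info : List (Int × String × String)) : List (String × List (Int × String × String)) :=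
  let sp := pvStatusPriority
  let seeded : PySem.Dict String (List (Int × String × String)) :=
    bugs_info.foldl (fun d b => if d.contains b.2.2 then d else d.insert b.2.2 []) ⟨[]⟩
  ((PySem.List.sorted2 bugs_info (fun x => sp.getD x.2.1 999) (fun x => x.1)).foldl
    (fun d b => d.modify b.2.2 [] (fun l => l ++ [b])) seeded).items

-- ===== PRECONDITION & SPEC =====
def Spec_organize_bugs_by_product (bugs_info : List (Int × String × String)) (out : List (String × List (Int × String × String))) : Prop := out = organize_bugs_by_product_alt bugs_info
instance (bugs_info : List (Int × String × String)) (out : List (String × List (Int × String × String))) : Decidable (Spec_organize_bugs_by_product bugs_info out) := by unfold Spec_organize_bugs_by_product; infer_instance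

-- ===== CLAIM (what is proved, stated in full; the proofs are below) =====
def Claim_equal_organize_bugs_by_product : Prop := ∀ (bugs_info : List (Int × String × String)), Dom_organize_bugs_by_product bugs_info → Spec_organize_bugs_by_product bugs_info (organize_bugs_by_product bugs_info)

-- ===== LEMMAS AND PROOFS =====

-- abbreviations for the proof
def pvPk (x : Int × String × String) : Int := pvStatusPriority.getD x.2.1 999
-- the strict 'before' predicate sorted2 uses for key (pvPk x, x.1)
def pvBl (a b : Int × String × String) : Bool :=
  decide (pvPk a < pvPk b) || (!decide (pvPk b < pvPk a) && decide (a.1 < b.1))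

theorem pvBl_asym (x y : Int × String × String) (h : pvBl x y = true) : pvBl y x = false := by
  simp [pvBl] at *; omega

theorem pvBl_tot (x y z : Int × String × String) (h1 : pvBl x y = true) (h2 : pvBl z y = false) :
    pvBl x z = true := by
  simp [pvBl] at *; omega

-- sorted2 with these keys IS the insertBy fold with pvBl
theorem pvSorted2_eq (xs : List (Int × String × String)) :
    PySem.List.sorted2 xs (fun x => pvStatusPriority.getD x.2.1 999) (fun x => x.1)
      = xs.foldl (fun acc x => PySem.List.insertBy pvBl x acc) [] := rfl

theorem pvInsertBy_pairwise (x : Int × String × String) (ys : List (Int × String × String))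
    (h : ys.Pairwise (fun a b => pvBl b a = false)) :
    (PySem.List.insertBy pvBl x ys).Pairwise (fun a b => pvBl b a = false) := by
  induction ys with
  | nil => simp [PySem.List.insertBy]
  | cons y t ih =>
    rw [List.pairwise_cons] at h
    obtain ⟨h1, h2⟩ := h
    by_cases hxy : pvBl x y = true
    · simp only [PySem.List.insertBy, hxy, if_true]
      refine List.Pairwise.cons ?_ (List.Pairwise.cons h1 h2)
      intro z hz
      rcases List.mem_cons.mp hz with rfl | hz
      · exact pvBl_asym x z hxy
      · exact pvBl_asym x z (pvBl_tot x y z hxy (h1 z hz))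
    · simp only [PySem.List.insertBy, hxy]
      refine List.Pairwise.cons ?_ (ih h2)
      intro z hz
      rcases (PySem.List.mem_insertBy pvBl x z t).mp hz with rfl | hz
      · exact Bool.eq_false_iff.mpr hxy
      · exact h1 z hz

theorem pvInsertBy_filter (p : Int × String × String → Bool) (x : Int × String × String)
    (ys : List (Int × String × String)) (h : ys.Pairwise (fun a b => pvBl b a = false)) :
    (PySem.List.insertBy pvBl x ys).filter p
      = if p x then PySem.List.insertBy pvBl x (ys.filter p) else ys.filter p := by
  induction ys with
  | nil => by_cases hp : p x = true <;> simp [PySem.List.insertBy, hp]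
  | cons y t ih =>
    rw [List.pairwise_cons] at h
    obtain ⟨h1, h2⟩ := h
    by_cases hxy : pvBl x y = true
    · simp only [PySem.List.insertBy, hxy, if_true]
      by_cases hp : p x = true
      · by_cases hpy : p y = true
        · simp [hp, hpy, PySem.List.insertBy, hxy]
        · simp only [List.filter_cons, hp, hpy, if_true, Bool.false_eq_true, if_false]
          cases hft : t.filter p with
          | nil => simp [PySem.List.insertBy]
          | cons z l =>
            have hz : z ∈ t := List.mem_of_mem_filter (hft ▸ List.mem_cons_self)
            have : pvBl x z = true := pvBl_tot x y z hxy (h1 z hz)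
            simp [PySem.List.insertBy, this]
      · simp [List.filter_cons, hp]
    · simp only [PySem.List.insertBy, hxy]
      by_cases hp : p x = true <;> by_cases hpy : p y = true <;>
        simp [hp, hpy, ih h2, PySem.List.insertBy, hxy]

theorem pvFoldIns_filter (p : Int × String × String → Bool) (xs acc : List (Int × String × String))
    (h : acc.Pairwise (fun a b => pvBl b a = false)) :
    (xs.foldl (fun acc x => PySem.List.insertBy pvBl x acc) acc).filter p
      = (xs.filter p).foldl (fun acc x => PySem.List.insertBy pvBl x acc) (acc.filter p) := by
  induction xs generalizing acc with
  | nil => rfl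
  | cons x xs ih =>
    simp only [List.foldl_cons, List.filter_cons]
    rw [ih _ (pvInsertBy_pairwise x acc h), pvInsertBy_filter p x acc h]
    by_cases hp : p x = true
    · simp [hp]
    · simp [Bool.eq_false_iff.mpr hp]

-- filtering commutes with the stable sort
theorem pvSorted2_filter (p : Int × String × String → Bool) (xs : List (Int × String × String)) :
    (PySem.List.sorted2 xs (fun x => pvStatusPriority.getD x.2.1 999) (fun x => x.1)).filter p
      = PySem.List.sorted2 (xs.filter p) (fun x => pvStatusPriority.getD x.2.1 999) (fun x => x.1) := by
  rw [pvSorted2_eq, pvSorted2_eq, pvFoldIns_filter p xs [] List.Pairwise.nil]; rfl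

-- ----- dict-items reference forms -----
def pvUpd (ps : List (String × List (Int × String × String))) (k : String) (b : Int × String × String) :
    List (String × List (Int × String × String)) :=
  ps.map (fun p => if p.1 == k then (p.1, p.2 ++ [b]) else p)

def pvKeysOf (bugs : List (Int × String × String)) : List String :=
  PySem.Set.ofList (bugs.map (fun b => b.2.2))

def pvG (bugs : List (Int × String × String)) : List (String × List (Int × String × String)) :=
  (pvKeysOf bugs).map (fun k => (k, bugs.filter (fun b => b.2.2 == k)))

-- one dict step 'd[k].append(b)' (k present, nodup keys) at the items level
theorem pvModify_items (ps : List (String × List (Int × String × String))) (k : String)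
    (b : Int × String × String) (hk : (ps.map Prod.fst).Nodup)
    (hmem : ps.any (fun p => p.1 == k) = true) :
    (PySem.Dict.modify (⟨ps⟩ : PySem.Dict String (List (Int × String × String))) k []
      (fun l => l ++ [b])).items = pvUpd ps k b := by
  induction ps with
  | nil => simp at hmem
  | cons p ps ih =>
    simp only [List.map_cons, List.nodup_cons] at hk
    by_cases hpk : (p.1 == k) = true
    · have hk1 : p.1 = k := by simpa using hpk
      have hnot : ∀ q ∈ ps, (q.1 == k) = false := by
        intro q hq
        have : q.1 ≠ p.1 := fun he => hk.1 (he ▸ List.mem_map_of_mem hq)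
        simp [hk1 ▸ this]
      have hmapid2 : pvUpd ps k b = ps := by
        unfold pvUpd
        exact List.map_congr_left (fun q hq => by simp [hnot q hq]) |>.trans (List.map_id _)
      simp [PySem.Dict.modify, PySem.Dict.insert, PySem.Dict.contains, PySem.Dict.getD,
        PySem.Dict.get?, pvUpd, hk1]
      intro a v hv
      have h := hnot (a, v) hv
      rw [Bool.eq_false_iff] at h
      have h' : a ≠ k := by simpa using h
      simp [h']
    · have hne : p.1 ≠ k := by simpa using hpk
      have hmem' : ps.any (fun q => q.1 == k) = true := by
        simpa [hpk] using hmem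
      have hstep : (PySem.Dict.modify (⟨p :: ps⟩ : PySem.Dict String (List (Int × String × String))) k []
          (fun l => l ++ [b])).items
          = p :: (PySem.Dict.modify (⟨ps⟩ : PySem.Dict String (List (Int × String × String))) k []
          (fun l => l ++ [b])).items := by
        simp [PySem.Dict.modify, PySem.Dict.insert, PySem.Dict.contains, PySem.Dict.getD,
          PySem.Dict.get?, hpk, hmem', hne]
      rw [hstep, ih hk.2 hmem']
      simp [pvUpd, hne]

theorem pvKeysOf_append (bugs : List (Int × String × String)) (b : Int × String × String) :
    pvKeysOf (bugs ++ [b]) = PySem.Set.add (pvKeysOf bugs) b.2.2 := by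
  simp [pvKeysOf, PySem.Set.ofList, List.foldl_append]

theorem pvKeysOf_nodup (bugs : List (Int × String × String)) : (pvKeysOf bugs).Nodup :=
  PySem.Set.nodup_ofList _

theorem pvMem_keysOf (bugs : List (Int × String × String)) (k : String) :
    k ∈ pvKeysOf bugs ↔ ∃ b ∈ bugs, b.2.2 = k := by
  simp [pvKeysOf]

theorem pvG_fst (bugs : List (Int × String × String)) :
    (pvG bugs).map Prod.fst = pvKeysOf bugs := by
  simp [pvG, List.map_map, Function.comp_def]

theorem pvG_any (bugs : List (Int × String × String)) (k : String) :
    (pvG bugs).any (fun p => p.1 == k) = true ↔ k ∈ pvKeysOf bugs := by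
  simp [pvG, List.any_map, Function.comp_def, List.any_eq_true, beq_iff_eq]

theorem pvFilter_nil_of_not_mem (bugs : List (Int × String × String)) (k : String)
    (h : k ∉ pvKeysOf bugs) : bugs.filter (fun b => b.2.2 == k) = [] := by
  rw [List.filter_eq_nil_iff]
  intro b hb hbk
  exact h ((pvMem_keysOf bugs k).mpr ⟨b, hb, by simpa using hbk⟩)

theorem pvSeed_items (bugs : List (Int × String × String)) :
    (bugs.foldl (fun d b => if d.contains b.2.2 then d else d.insert b.2.2 [])
      (⟨[]⟩ : PySem.Dict String (List (Int × String × String)))).items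
      = (pvKeysOf bugs).map (fun k => (k, [])) := by
  induction bugs using List.reverseRecOn with
  | nil => rfl
  | append_singleton bugs b ih =>
    rw [List.foldl_append, List.foldl_cons, List.foldl_nil]
    have hD : bugs.foldl (fun d b => if d.contains b.2.2 then d else d.insert b.2.2 [])
        (⟨[]⟩ : PySem.Dict String (List (Int × String × String)))
        = ⟨(pvKeysOf bugs).map (fun k => (k, []))⟩ := congrArg PySem.Dict.mk ih
    rw [hD, pvKeysOf_append]
    by_cases hin : b.2.2 ∈ pvKeysOf bugs
    · have hc : PySem.Dict.contains (⟨(pvKeysOf bugs).map (fun k => (k, []))⟩ :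
          PySem.Dict String (List (Int × String × String))) b.2.2 = true := by
        simp only [PySem.Dict.contains]
        simp [List.any_map, Function.comp_def, beq_iff_eq]
        exact hin
      have hs : PySem.Set.add (pvKeysOf bugs) b.2.2 = pvKeysOf bugs := by
        simp [PySem.Set.add, PySem.Set.contains, hin]
      rw [hs]
      simp [hc]
    · have hc : PySem.Dict.contains (⟨(pvKeysOf bugs).map (fun k => (k, []))⟩ :
          PySem.Dict String (List (Int × String × String))) b.2.2 = false := by
        simp only [PySem.Dict.contains]
        simp [List.any_map, Function.comp_def, beq_iff_eq]
        intro k' hk' he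
        exact absurd (he ▸ hk') hin
      have hs : PySem.Set.add (pvKeysOf bugs) b.2.2 = pvKeysOf bugs ++ [b.2.2] := by
        simp [PySem.Set.add, PySem.Set.contains, hin]
      have hic : PySem.Dict.contains (⟨(pvKeysOf bugs).map (fun k => (k, []))⟩ :
          PySem.Dict String (List (Int × String × String))) b.2.2 ≠ true := by simp [hc]
      rw [hs]
      simp only [hc, Bool.false_eq_true, if_false, PySem.Dict.insert]
      simp

theorem pvA_items (bugs : List (Int × String × String)) :
    (bugs.foldl (fun d b =>
      let d := if d.contains b.2.2 then d else d.insert b.2.2 []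
      d.modify b.2.2 [] (fun l => l ++ [b])) (⟨[]⟩ : PySem.Dict String (List (Int × String × String)))).items
      = pvG bugs := by
  induction bugs using List.reverseRecOn with
  | nil => rfl
  | append_singleton bugs b ih =>
    rw [List.foldl_append, List.foldl_cons, List.foldl_nil]
    have hD : bugs.foldl (fun d b =>
        let d := if d.contains b.2.2 then d else d.insert b.2.2 []
        d.modify b.2.2 [] (fun l => l ++ [b])) (⟨[]⟩ : PySem.Dict String (List (Int × String × String)))
        = ⟨pvG bugs⟩ := congrArg PySem.Dict.mk ih
    rw [hD]
    have hnodup : ((pvG bugs).map Prod.fst).Nodup := by rw [pvG_fst]; exact pvKeysOf_nodup bugs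
    by_cases hin : b.2.2 ∈ pvKeysOf bugs
    · have hc : PySem.Dict.contains (⟨pvG bugs⟩ : PySem.Dict String (List (Int × String × String))) b.2.2 = true := by
        simp only [PySem.Dict.contains]
        exact (pvG_any bugs b.2.2).mpr hin
      simp only [hc, if_true]
      rw [pvModify_items (pvG bugs) b.2.2 b hnodup ((pvG_any bugs b.2.2).mpr hin)]
      have hs : PySem.Set.add (pvKeysOf bugs) b.2.2 = pvKeysOf bugs := by
        simp [PySem.Set.add, PySem.Set.contains, hin]
      unfold pvUpd pvG
      rw [pvKeysOf_append, hs, List.map_map]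
      refine List.map_congr_left (fun k' _ => ?_)
      simp only [Function.comp_apply, List.filter_append, List.filter_cons, List.filter_nil]
      by_cases hk' : k' = b.2.2
      · subst hk'
        simp
      · have h1 : (k' == b.2.2) = false := by simpa using hk'
        have h2 : ¬ (b.2.2 == k') = true := by simpa using fun h => hk' h.symm
        simp [h1, h2]
    · have hc : PySem.Dict.contains (⟨pvG bugs⟩ : PySem.Dict String (List (Int × String × String))) b.2.2 = false := by
        simp only [PySem.Dict.contains]
        rw [Bool.eq_false_iff]
        intro h
        exact hin ((pvG_any bugs b.2.2).mp h)
      have hic : PySem.Dict.contains (⟨pvG bugs⟩ : PySem.Dict String (List (Int × String × String))) b.2.2 ≠ true := by simp [hc]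
      have hD2 : PySem.Dict.insert (⟨pvG bugs⟩ : PySem.Dict String (List (Int × String × String))) b.2.2 []
          = ⟨pvG bugs ++ [(b.2.2, [])]⟩ := by
        simp [PySem.Dict.insert, hic]
      simp only [hc, Bool.false_eq_true, if_false, hD2]
      have hk' : ((pvG bugs ++ [(b.2.2, [])]).map Prod.fst).Nodup := by
        rw [List.map_append, pvG_fst]
        simp [List.nodup_append, pvKeysOf_nodup bugs]
        exact fun a ha he => hin (he ▸ ha)
      have hm' : (pvG bugs ++ [(b.2.2, [])]).any (fun p => p.1 == b.2.2) = true := by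
        simp
      rw [pvModify_items _ b.2.2 b hk' hm']
      have hs : PySem.Set.add (pvKeysOf bugs) b.2.2 = pvKeysOf bugs ++ [b.2.2] := by
        simp [PySem.Set.add, PySem.Set.contains, hin]
      unfold pvUpd pvG
      rw [pvKeysOf_append, hs, List.map_append, List.map_append, List.map_map]
      congr 1
      · refine List.map_congr_left (fun k' hk'' => ?_)
        have hne : k' ≠ b.2.2 := fun he => hin (he ▸ hk'')
        have h1 : (k' == b.2.2) = false := by simpa using hne
        have h2 : ¬ (b.2.2 == k') = true := by simpa using fun h => hne h.symm
        simp [Function.comp_apply, List.filter_append, h2]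
        exact hne
      · simp [List.filter_append, pvFilter_nil_of_not_mem bugs b.2.2 hin]

theorem pvUpd_fst (ps : List (String × List (Int × String × String))) (k : String)
    (b : Int × String × String) : (pvUpd ps k b).map Prod.fst = ps.map Prod.fst := by
  simp only [pvUpd, List.map_map]
  refine List.map_congr_left (fun p _ => ?_)
  simp only [Function.comp_apply]
  split <;> rfl

-- B's appending fold at the items level
theorem pvApp_items (bs : List (Int × String × String))
    (ps : List (String × List (Int × String × String))) (hk : (ps.map Prod.fst).Nodup)
    (hmem : ∀ b ∈ bs, ps.any (fun p => p.1 == b.2.2) = true) :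
    (bs.foldl (fun d b => d.modify b.2.2 [] (fun l => l ++ [b]))
      (⟨ps⟩ : PySem.Dict String (List (Int × String × String)))).items
      = ps.map (fun p => (p.1, p.2 ++ bs.filter (fun b => b.2.2 == p.1))) := by
  induction bs generalizing ps with
  | nil => simp
  | cons b bs ih =>
    rw [List.foldl_cons]
    have hD : PySem.Dict.modify (⟨ps⟩ : PySem.Dict String (List (Int × String × String))) b.2.2 []
        (fun l => l ++ [b]) = ⟨pvUpd ps b.2.2 b⟩ :=
      congrArg PySem.Dict.mk (pvModify_items ps b.2.2 b hk (hmem b List.mem_cons_self))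
    rw [hD]
    have hk' : ((pvUpd ps b.2.2 b).map Prod.fst).Nodup := by rw [pvUpd_fst]; exact hk
    have hany : ∀ x : String, (pvUpd ps b.2.2 b).any (fun p => p.1 == x) = ps.any (fun p => p.1 == x) := by
      intro x
      have h1 := List.any_map (l := pvUpd ps b.2.2 b) (f := Prod.fst) (p := fun y => y == x)
      have h2 := List.any_map (l := ps) (f := Prod.fst) (p := fun y => y == x)
      simp only [Function.comp_def] at h1 h2
      rw [← h1, ← h2, pvUpd_fst]
    rw [ih (pvUpd ps b.2.2 b) hk' (fun c hc => (hany c.2.2).trans (hmem c (List.mem_cons_of_mem b hc)))]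
    simp only [pvUpd, List.map_map]
    refine List.map_congr_left (fun p _ => ?_)
    by_cases h : (p.1 == b.2.2) = true
    · have he : b.2.2 = p.1 := by simpa using (beq_iff_eq.mp h).symm
      simp [Function.comp, he]
    · have he : ¬ (b.2.2 == p.1) = true := by
        simp only [beq_iff_eq] at h ⊢; exact fun hh => h hh.symm
      simp [Function.comp, h, he]

-- ===== VERDICT (by name: the statement is the Claim_ definition above) =====
theorem organize_bugs_by_product_spec : Claim_equal_organize_bugs_by_product := by
  intro bugs _
  unfold Spec_organize_bugs_by_product organize_bugs_by_product organize_bugs_by_product_alt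
  simp only []
  rw [pvA_items]
  have hseed : bugs.foldl (fun d b => if d.contains b.2.2 then d else d.insert b.2.2 [])
      (⟨[]⟩ : PySem.Dict String (List (Int × String × String)))
      = ⟨(pvKeysOf bugs).map (fun k => (k, []))⟩ := congrArg PySem.Dict.mk (pvSeed_items bugs)
  rw [hseed]
  have hkk : (((pvKeysOf bugs).map (fun k => (k, ([] : List (Int × String × String))))).map Prod.fst).Nodup := by
    simp only [List.map_map, Function.comp_def]
    simpa using pvKeysOf_nodup bugs
  have hmm : ∀ c ∈ PySem.List.sorted2 bugs (fun x => pvStatusPriority.getD x.2.1 999) (fun x => x.1),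
      ((pvKeysOf bugs).map (fun k => (k, ([] : List (Int × String × String))))).any
        (fun p => p.1 == c.2.2) = true := by
    intro c hc
    have hcb : c ∈ bugs := (PySem.List.sorted2_perm bugs _ _ false).mem_iff.mp hc
    have : c.2.2 ∈ pvKeysOf bugs := (pvMem_keysOf bugs c.2.2).mpr ⟨c, hcb, rfl⟩
    simp only [List.any_map, Function.comp_def, List.any_eq_true, beq_iff_eq]
    exact ⟨c.2.2, this, rfl⟩
  rw [pvApp_items _ _ hkk hmm]
  unfold pvG
  simp only [List.map_map]
  refine List.map_congr_left (fun k _ => ?_)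
  simp only [Function.comp_apply, List.nil_append]
  exact congrArg (fun l => (k, l)) (pvSorted2_filter (fun b => b.2.2 == k) bugs).symm
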